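-- pv_equiv track=rewrite | github.com/huangzaoying/solve | solve2.py | replace_duplicate_chars
-- ===== SOURCE A (Python) =====
-- def replace_duplicate_chars(string, k):
--     # 创建一个字典，用于存储每个字符最后一次出现的位置
--     last_occurrence = {}
--     result = ''
--
--     for i, char in enumerate(string):
--         # 如果字符在字典中，并且当前位置与上一次出现的位置的差值小于等于k
--         if char in last_occurrence and i - last_occurrence[char] <= k:
--             result += '-'
--         else:
--             result += char
--         last_occurrence[char] = i
--
--     return result
-- ===== SOURCE B (Python) =====
-- def replace_duplicate_chars(string, k):
--     out = []
--     for i, char in enumerate(string):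
--         if char in string[max(0, i - k):i]:
--             out.append('-')
--         else:
--             out.append(char)
--     return ''.join(out)
-- ===== Notes on version B (the rewrite author's own statement) =====
-- stated objective: simpler
-- what changed: B drops the maintained last-occurrence dictionary and instead tests each character for membership in the preceding length-k window slice of the original string, joining the generated characters at the end.
import Mathlib
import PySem

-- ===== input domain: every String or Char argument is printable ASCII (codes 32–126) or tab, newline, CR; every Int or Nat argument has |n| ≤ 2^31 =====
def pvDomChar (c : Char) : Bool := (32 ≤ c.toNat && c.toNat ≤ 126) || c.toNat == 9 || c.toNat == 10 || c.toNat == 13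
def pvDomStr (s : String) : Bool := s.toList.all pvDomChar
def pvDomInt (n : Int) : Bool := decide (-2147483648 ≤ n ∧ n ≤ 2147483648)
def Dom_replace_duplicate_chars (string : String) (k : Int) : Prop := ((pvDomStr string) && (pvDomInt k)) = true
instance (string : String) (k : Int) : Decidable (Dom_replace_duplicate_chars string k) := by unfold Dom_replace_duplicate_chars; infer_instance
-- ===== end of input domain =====

-- B replaces A's maintained last-occurrence dictionary with a membership test in the
-- preceding length-k window of the original string (simpler decomposition, same result).

-- ===== PORT A =====
-- state: (last_occurrence dict, result as list of chars); result string is built at the end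
def replace_duplicate_chars (string : String) (k : Int) : String :=
  let step : PySem.Dict Char Int × List Char → Int × Char → PySem.Dict Char Int × List Char :=
    fun st p =>
      let res' := if st.1.contains p.2 && decide (p.1 - st.1.getD p.2 0 ≤ k)
                  then st.2 ++ ['-'] else st.2 ++ [p.2]
      (st.1.insert p.2 p.1, res')
  String.ofList ((PySem.List.enumerate string.toList 0).foldl step (PySem.Dict.empty, [])).2

-- ===== PORT B =====
def replace_duplicate_chars_alt (string : String) (k : Int) : String :=
  let cs := string.toList
  String.ofList ((PySem.List.enumerate cs 0).map (fun p =>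
    if p.2 ∈ PySem.List.slice cs (some (max 0 (p.1 - k))) (some p.1) then '-' else p.2))

-- ===== PRECONDITION & SPEC =====
def Spec_replace_duplicate_chars (string : String) (k : Int) (out : String) : Prop := out = replace_duplicate_chars_alt string k
instance (string : String) (k : Int) (out : String) : Decidable (Spec_replace_duplicate_chars string k out) := by unfold Spec_replace_duplicate_chars; infer_instance

-- ===== CLAIM (what is proved, stated in full; the proofs are below) =====
def Claim_equal_replace_duplicate_chars : Prop := ∀ (string : String) (k : Int), Dom_replace_duplicate_chars string k → Spec_replace_duplicate_chars string k (replace_duplicate_chars string k)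

-- ===== LEMMAS AND PROOFS =====

-- the dict invariant: d.contains c with d.getD c 0 >= m iff c occurs in the processed prefix at index >= m
def pvInv (full : List Char) (i : Nat) (d : PySem.Dict Char Int) : Prop :=
  ∀ (c : Char) (m : Int), (d.contains c = true ∧ m ≤ d.getD c 0) ↔ c ∈ (full.take i).drop m.toNat

theorem pv_mem_drop_concat {α : Type} (l : List α) (x c : α) (t : Nat) :
    (c ∈ (l ++ [x]).drop t) ↔ (c ∈ l.drop t ∨ (t ≤ l.length ∧ c = x)) := by
  by_cases h : t ≤ l.length
  · rw [List.drop_append_of_le_length h]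
    simp [h]
  · rw [List.drop_eq_nil_of_le (by simp; omega), List.drop_eq_nil_of_le (by omega)]
    simp; omega

theorem pvInv_step (full : List Char) (i : Nat) (d : PySem.Dict Char Int) (x : Char)
    (hi : full[i]? = some x) (hInv : pvInv full i d) :
    pvInv full (i + 1) (d.insert x (i : Int)) := by
  intro c m
  have htake : full.take (i + 1) = full.take i ++ [x] := by
    rw [List.take_add_one, hi]; rfl
  have hlen : (full.take i).length = i := by
    have : i < full.length := (List.getElem?_eq_some_iff.mp hi).1
    simp [List.length_take]; omega
  rw [htake, pv_mem_drop_concat, hlen, ← hInv c m]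
  by_cases hc : c = x
  · subst hc
    have e1 : (d.insert c (i : Int)).contains c = true :=
      PySem.Dict.contains_insert_self d c (i : Int)
    have e2 : (d.insert c (i : Int)).getD c 0 = (i : Int) :=
      PySem.Dict.getD_insert_self d c (i : Int) 0
    rw [e1, e2]
    constructor
    · rintro ⟨-, hm⟩
      exact Or.inr ⟨by omega, rfl⟩
    · rintro (⟨hcon, hm⟩ | ⟨ht, -⟩)
      · refine ⟨rfl, ?_⟩
        have hmem := (hInv c m).mp ⟨hcon, hm⟩
        have hne : (full.take i).drop m.toNat ≠ [] := List.ne_nil_of_mem hmem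
        have hlt : m.toNat < (full.take i).length := by
          by_contra hgt
          exact hne (List.drop_eq_nil_of_le (by omega))
        rw [hlen] at hlt
        omega
      · exact ⟨rfl, by omega⟩
  · have e1 : (d.insert x (i : Int)).contains c = d.contains c := by
      simp [PySem.Dict.contains_insert, hc]
    have e2 : (d.insert x (i : Int)).getD c 0 = d.getD c 0 := by
      simp [PySem.Dict.getD_insert, hc]
    rw [e1, e2]
    simp [hc]

theorem pv_condA_iff_condB (full : List Char) (k : Int) (i : Nat) (d : PySem.Dict Char Int)
    (x : Char) (hInv : pvInv full i d) :
    ((d.contains x && decide ((i : Int) - d.getD x 0 ≤ k)) = true)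
      ↔ x ∈ PySem.List.slice full (some (max 0 ((i : Int) - k))) (some (i : Int)) := by
  have hs : PySem.List.slice full (some (max 0 ((i : Int) - k))) (some (i : Int))
      = (full.take i).drop ((i : Int) - k).toNat := by
    rw [PySem.List.slice_toNat full (by omega) (by omega), List.drop_take]
    have h1 : (max 0 ((i : Int) - k)).toNat = ((i : Int) - k).toNat := by omega
    have h2 : ((i : Int)).toNat = i := by omega
    rw [h1, h2]
  rw [hs, ← hInv x ((i : Int) - k)]
  constructor
  · intro h
    simp only [Bool.and_eq_true, decide_eq_true_eq] at h
    exact ⟨h.1, by omega⟩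
  · rintro ⟨hcon, hm⟩
    simp only [Bool.and_eq_true, decide_eq_true_eq]
    exact ⟨hcon, by omega⟩

-- the main fold lemma, by induction on the unprocessed suffix
theorem pv_fold_eq (k : Int) (full : List Char) :
    ∀ (suf : List Char) (i : Nat) (d : PySem.Dict Char Int) (res : List Char),
    full.drop i = suf → pvInv full i d →
    ((PySem.List.enumerate suf (i : Int)).foldl
        (fun st p =>
          let res' := if st.1.contains p.2 && decide (p.1 - st.1.getD p.2 0 ≤ k)
                      then st.2 ++ ['-'] else st.2 ++ [p.2]
          (st.1.insert p.2 p.1, res'))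
        (d, res)).2
      = res ++ (PySem.List.enumerate suf (i : Int)).map (fun p =>
          if p.2 ∈ PySem.List.slice full (some (max 0 (p.1 - k))) (some p.1) then '-' else p.2) := by
  intro suf
  induction suf with
  | nil => intro i d res _ _; simp [PySem.List.enumerate_nil]
  | cons x rest ih =>
    intro i d res hdrop hInv
    have hi : full[i]? = some x := by
      have h0 : (full.drop i)[0]? = some x := by rw [hdrop]; rfl
      rw [List.getElem?_drop] at h0
      simpa using h0
    have hdrop' : full.drop (i + 1) = rest := by
      rw [← List.tail_drop, hdrop]
      rfl
    rw [PySem.List.enumerate_cons]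
    simp only [List.foldl_cons, List.map_cons]
    have hcond := pv_condA_iff_condB full k i d x hInv
    have hcast : (i : Int) + 1 = ((i + 1 : Nat) : Int) := by push_cast; ring
    rw [hcast,
      ih (i + 1) (d.insert x (i : Int)) _ hdrop' (pvInv_step full i d x hi hInv)]
    by_cases hb : (d.contains x && decide ((i : Int) - d.getD x 0 ≤ k)) = true
    · rw [if_pos hb, if_pos (hcond.mp hb)]
      simp
    · rw [if_neg hb, if_neg (fun h => hb (hcond.mpr h))]
      simp

-- ===== VERDICT (by name: the statement is the Claim_ definition above) =====
theorem replace_duplicate_chars_spec : Claim_equal_replace_duplicate_chars := by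
  intro string k _
  unfold Spec_replace_duplicate_chars replace_duplicate_chars replace_duplicate_chars_alt
  have h0 : pvInv string.toList 0 (PySem.Dict.empty) := by
    intro c m
    simp [PySem.Dict.contains_empty]
  have h := pv_fold_eq k string.toList string.toList 0 PySem.Dict.empty [] (by simp) h0
  simp only [Nat.cast_zero, List.nil_append] at h
  simp only [h]
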